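-- pv_equiv track=rewrite | github.com/InDevRus/polynomials | parsing.py | cut_sum_lexemes
-- ===== SOURCE A (Python) =====
-- def cut_sum_lexemes(string: str) -> list:
--     """
--     Returns a list of sum lexemes in a list.
--     """
--     index = 0
--     lexemeList = []
--     lastLexeme = 0
--     while index < len(string):
--         symbol = string[index]
--         if symbol in '+-':
--             token = string[lastLexeme:index]
--             if token != '':
--                 lexemeList.append(token)
--             lastLexeme = index
--             if symbol == '+':
--                 lastLexeme += 1
--         elif symbol == '(':
--             index = find_corresponding_bracket(
--                 string, index)
--         index += 1
--     token = string[lastLexeme:index]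
--     if token != '':
--         lexemeList.append(token)
--     return lexemeList
--
-- def find_corresponding_bracket(string: str, index: int) -> int:
--     """
--     Find the position of the
--     nearest corresponding bracket
--     in string from the position of
--     opening or closing bracket.
--     """
--     openingBracket = string[index] == '('
--     bracketBalance = 0
--     for pointer in (
--             range(index + 1, len(string), 1) if openingBracket
--             else range(index - 1, -1, -1)):
--         subSymbol = string[pointer]
--         if bracketBalance == 0 and subSymbol == (')' if openingBracket
--                                                  else '('):
--             return pointer
--         if subSymbol == ')':
--             bracketBalance -= 1
--         elif subSymbol == '(':
--             bracketBalance += 1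
-- ===== SOURCE B (Python) =====
-- def cut_sum_lexemes(string: str) -> list:
--     """
--     One flat left-to-right pass with a bracket-depth counter instead of
--     jumping via a nested matching-bracket scan.
--     """
--     lexemes = []
--     depth = 0
--     last = 0
--     for i, ch in enumerate(string):
--         if ch == '(':
--             depth += 1
--         elif ch == ')':
--             if depth > 0:
--                 depth -= 1
--         elif depth == 0 and ch in '+-':
--             token = string[last:i]
--             if token:
--                 lexemes.append(token)
--             last = i if ch == '-' else i + 1
--     token = string[last:]
--     if token:
--         lexemes.append(token)
--     return lexemes
-- ===== Notes on version B (the rewrite author's own statement) =====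
-- stated objective: simpler
-- what changed: Replaces A's jump-to-matching-bracket scan (with the nested find_corresponding_bracket sub-scan) by one flat left-to-right pass that maintains an integer bracket-depth counter and splits on '+'/'-' only at depth 0.
-- outside the precondition, e.g. on cut_sum_lexemes('('): A raises TypeError, B returns ['(']
import Mathlib
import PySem

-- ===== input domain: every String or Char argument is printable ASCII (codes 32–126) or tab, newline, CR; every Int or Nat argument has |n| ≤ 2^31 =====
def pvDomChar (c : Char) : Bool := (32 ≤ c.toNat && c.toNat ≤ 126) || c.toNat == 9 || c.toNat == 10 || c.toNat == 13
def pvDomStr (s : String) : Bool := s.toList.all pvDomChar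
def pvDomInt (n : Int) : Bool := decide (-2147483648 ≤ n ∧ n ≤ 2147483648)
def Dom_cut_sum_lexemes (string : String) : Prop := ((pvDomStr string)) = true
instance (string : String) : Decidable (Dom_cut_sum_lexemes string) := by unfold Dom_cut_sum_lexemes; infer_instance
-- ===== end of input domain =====

-- B replaces A's jump-to-matching-bracket scan (a nested rescan per top-level bracket)
-- by one flat pass with a bracket-depth counter (objective: simpler — no helper, one
-- loop; same return value on all bracket-balanced inputs).

-- ===== PORT A =====
-- string[a:b] for natural a, b — exact for the nonnegative indices both ports use
def pvSlice (l : List Char) (a b : Nat) : List Char := (l.drop a).take (b - a)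

-- for-loop body of find_corresponding_bracket over the pointer list
def pvFcbLoop (l : List Char) (opening : Bool) (ptrs : List Nat) (balance : Int) : Option Nat :=
  match ptrs with
  | [] => none
  | p :: rest =>
    if balance = 0 ∧ l.getD p ' ' = (if opening then ')' else '(') then some p
    else pvFcbLoop l opening rest
      (if l.getD p ' ' = ')' then balance - 1
       else if l.getD p ' ' = '(' then balance + 1 else balance)

-- find_corresponding_bracket; `none` is exactly Python's fall-off-the-loop `return None`
def pvFindBracket (l : List Char) (index : Nat) : Option Nat :=
  if l.getD index ' ' = '(' then
    pvFcbLoop l true (List.range' (index + 1) (l.length - (index + 1))) 0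
  else
    pvFcbLoop l false ((List.range index).reverse) 0

theorem pvFcbLoop_mem {l : List Char} {op : Bool} {ptrs : List Nat} {b : Int} {p : Nat}
    (h : pvFcbLoop l op ptrs b = some p) : p ∈ ptrs := by
  induction ptrs generalizing b with
  | nil => simp [pvFcbLoop] at h
  | cons q rest ih =>
    unfold pvFcbLoop at h
    by_cases hc : b = 0 ∧ l.getD q ' ' = (if op then ')' else '(')
    · rw [if_pos hc] at h
      obtain rfl := Option.some.inj h
      exact List.mem_cons_self
    · rw [if_neg hc] at h
      exact List.mem_cons_of_mem _ (ih h)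

theorem pvFindBracket_ge {l : List Char} {index p : Nat}
    (hc : l.getD index ' ' = '(') (h : pvFindBracket l index = some p) :
    index + 1 ≤ p := by
  unfold pvFindBracket at h
  rw [if_pos hc] at h
  have h2 : index < p ∧ p < index + 1 + (l.length - (index + 1)) := by
    simpa using pvFcbLoop_mem h
  omega

-- while-loop of cut_sum_lexemes; on the `none` crash branch Python raises TypeError
-- (index = None; None + 1) — those inputs are outside Pre_
def pvCutA (l : List Char) (index lastLexeme : Nat) (acc : List String) : List String :=
  if h : index < l.length then
    if l.getD index ' ' = '+' ∨ l.getD index ' ' = '-' then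
      pvCutA l (index + 1)
        (if l.getD index ' ' = '+' then index + 1 else index)
        (if pvSlice l lastLexeme index ≠ [] then
           acc ++ [String.mk (pvSlice l lastLexeme index)] else acc)
    else if hb : l.getD index ' ' = '(' then
      match hp : pvFindBracket l index with
      | some p => pvCutA l (p + 1) lastLexeme acc
      | none => acc  -- Python raises TypeError here; excluded by Pre_
    else pvCutA l (index + 1) lastLexeme acc
  else
    if pvSlice l lastLexeme index ≠ [] then
      acc ++ [String.mk (pvSlice l lastLexeme index)] else acc
termination_by l.length - index
decreasing_by
  · omega
  · have := pvFindBracket_ge hb hp; omega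
  · omega

def cut_sum_lexemes (string : String) : List String :=
  pvCutA string.toList 0 0 []

-- ===== PORT B =====
-- for-loop of B: rest is the unscanned suffix, i its start position
def pvCutB (l : List Char) (i : Nat) (rest : List Char) (depth last : Nat)
    (acc : List String) : List String :=
  match rest with
  | [] =>
    if l.drop last ≠ [] then acc ++ [String.mk (l.drop last)] else acc
  | c :: rest' =>
    if c = '(' then pvCutB l (i + 1) rest' (depth + 1) last acc
    else if c = ')' then
      pvCutB l (i + 1) rest' (if depth > 0 then depth - 1 else depth) last acc
    else if depth = 0 ∧ (c = '+' ∨ c = '-') then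
      pvCutB l (i + 1) rest' depth (if c = '-' then i else i + 1)
        (if pvSlice l last i ≠ [] then acc ++ [String.mk (pvSlice l last i)] else acc)
    else pvCutB l (i + 1) rest' depth last acc

def cut_sum_lexemes_alt (string : String) : List String :=
  pvCutB string.toList 0 string.toList 0 0 []

-- ===== PRECONDITION & SPEC =====
-- clamped bracket-depth step: '(' opens, ')' closes only when something is open
def pvStep (d : Nat) (c : Char) : Nat :=
  if c = '(' then d + 1 else if c = ')' then d - 1 else d

-- Pre_ excludes exactly the strings with an unmatched '(' (clamped depth ≠ 0 at the end),
-- on which Python A raises TypeError (find_corresponding_bracket returns None, then None + 1).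
def Pre_cut_sum_lexemes (string : String) : Prop :=
  string.toList.foldl pvStep 0 = 0
instance (string : String) : Decidable (Pre_cut_sum_lexemes string) := by
  unfold Pre_cut_sum_lexemes; infer_instance

def pvWitness_cut_sum_lexemes : String := "(x+1)-2*y"

def Spec_cut_sum_lexemes (string : String) (out : List String) : Prop := out = cut_sum_lexemes_alt string
instance (string : String) (out : List String) : Decidable (Spec_cut_sum_lexemes string out) := by unfold Spec_cut_sum_lexemes; infer_instance

-- ===== CLAIM (what is proved, stated in full; the proofs are below) =====
def Claim_equal_cut_sum_lexemes : Prop := ∀ (string : String), Dom_cut_sum_lexemes string → Pre_cut_sum_lexemes string → Spec_cut_sum_lexemes string (cut_sum_lexemes string)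
-- ===== LEMMAS AND PROOFS =====

theorem pvStep_open (d : Nat) : pvStep d '(' = d + 1 := by simp [pvStep]
theorem pvStep_close (d : Nat) : pvStep d ')' = d - 1 := by simp [pvStep]
theorem pvStep_other (d : Nat) {c : Char} (h1 : c ≠ '(') (h2 : c ≠ ')') :
    pvStep d c = d := by simp [pvStep, h1, h2]

-- the bracket sub-scan of A corresponds to B's depth counter: if the scan started at j
-- with balance b finds its ')' at p, then B's pass crosses positions j..p going from
-- depth b+1 back to depth b, touching nothing else; same for the clamped-depth fold
theorem pvFcb_skip (l : List Char) :
    ∀ n j (b : Nat) p, l.length - j = n →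
    pvFcbLoop l true (List.range' j (l.length - j)) (b : Int) = some p →
    ((l.drop j).foldl pvStep (b + 1) = (l.drop (p + 1)).foldl pvStep 0 ∧
     ∀ last acc, pvCutB l j (l.drop j) (b + 1) last acc
               = pvCutB l (p + 1) (l.drop (p + 1)) 0 last acc) := by
  intro n
  induction n with
  | zero =>
    intro j b p hn h
    rw [hn] at h; simp [pvFcbLoop] at h
  | succ m ih =>
    intro j b p hn h
    have hj : j < l.length := by omega
    have hr : List.range' j (l.length - j) = j :: List.range' (j + 1) (l.length - (j + 1)) := by
      have he : l.length - j = (l.length - (j + 1)) + 1 := by omega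
      rw [he, List.range'_succ]
    rw [hr] at h
    unfold pvFcbLoop at h
    have htgt : (if (true : Bool) then ')' else '(') = ')' := rfl
    rw [htgt] at h
    have hget : l.getD j ' ' = l[j] := List.getD_eq_getElem l ' ' hj
    have hdrop : l.drop j = l[j] :: l.drop (j + 1) := List.drop_eq_getElem_cons hj
    by_cases hstop : (b : Int) = 0 ∧ l.getD j ' ' = ')'
    · -- found the matching bracket at p = j
      rw [if_pos hstop] at h
      obtain rfl := Option.some.inj h
      have hb0 : b = 0 := by exact_mod_cast hstop.1
      subst hb0
      have hc : l[j] = ')' := hget ▸ hstop.2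
      constructor
      · rw [hdrop, List.foldl_cons, hc, pvStep_close]
      · intro last acc
        rw [hdrop]
        conv_lhs => unfold pvCutB
        rw [hc, if_neg (show ¬ ((')' : Char) = '(') by decide), if_pos rfl,
          if_pos (show 0 + 1 > 0 by omega)]
    · rw [if_neg hstop] at h
      by_cases hcp : l.getD j ' ' = ')'
      · -- nested ')': balance ≥ 1 here, both sides decrement
        have hbne : b ≠ 0 := fun hb => hstop ⟨by exact_mod_cast hb, hcp⟩
        have hcast : (if l.getD j ' ' = ')' then (b : Int) - 1
            else if l.getD j ' ' = '(' then (b : Int) + 1 else (b : Int))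
            = ((b - 1 : Nat) : Int) := by
          rw [if_pos hcp]; omega
        rw [hcast] at h
        obtain ⟨h1, h2⟩ := ih (j + 1) (b - 1) p (by omega) h
        have hc : l[j] = ')' := hget ▸ hcp
        have he : b + 1 - 1 = (b - 1) + 1 := by omega
        constructor
        · rw [hdrop, List.foldl_cons, hc, pvStep_close, he]
          exact h1
        · intro last acc
          rw [hdrop]
          conv_lhs => unfold pvCutB
          rw [hc, if_neg (show ¬ ((')' : Char) = '(') by decide), if_pos rfl,
            if_pos (show b + 1 > 0 by omega), he]
          exact h2 last acc
      · by_cases hco : l.getD j ' ' = '('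
        · -- nested '(': both sides increment
          have hcast : (if l.getD j ' ' = ')' then (b : Int) - 1
              else if l.getD j ' ' = '(' then (b : Int) + 1 else (b : Int))
              = ((b + 1 : Nat) : Int) := by
            rw [if_neg hcp, if_pos hco]; omega
          rw [hcast] at h
          obtain ⟨h1, h2⟩ := ih (j + 1) (b + 1) p (by omega) h
          have hc : l[j] = '(' := hget ▸ hco
          constructor
          · rw [hdrop, List.foldl_cons, hc, pvStep_open]
            exact h1
          · intro last acc
            rw [hdrop]
            conv_lhs => unfold pvCutB
            rw [hc, if_pos rfl]
            exact h2 last acc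
        · -- other character: ignored at depth ≥ 1 by both sides
          have hcast : (if l.getD j ' ' = ')' then (b : Int) - 1
              else if l.getD j ' ' = '(' then (b : Int) + 1 else (b : Int))
              = ((b : Nat) : Int) := by
            rw [if_neg hcp, if_neg hco]
          rw [hcast] at h
          obtain ⟨h1, h2⟩ := ih (j + 1) b p (by omega) h
          have hc1 : l[j] ≠ ')' := hget ▸ hcp
          have hc2 : l[j] ≠ '(' := hget ▸ hco
          constructor
          · rw [hdrop, List.foldl_cons, pvStep_other _ hc2 hc1]
            exact h1
          · intro last acc
            rw [hdrop]
            conv_lhs => unfold pvCutB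
            rw [if_neg hc2, if_neg hc1,
              if_neg (show ¬ (b + 1 = 0 ∧ (l[j] = '+' ∨ l[j] = '-')) from
                fun hx => Nat.succ_ne_zero b hx.1)]
            exact h2 last acc

-- if the sub-scan finds no matching ')', the clamped depth never returns to 0
theorem pvFcb_none (l : List Char) :
    ∀ n j (b : Nat), l.length - j = n →
    pvFcbLoop l true (List.range' j (l.length - j)) (b : Int) = none →
    0 < (l.drop j).foldl pvStep (b + 1) := by
  intro n
  induction n with
  | zero =>
    intro j b hn _
    rw [List.drop_eq_nil_of_le (by omega)]; simp
  | succ m ih =>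
    intro j b hn h
    have hj : j < l.length := by omega
    have hr : List.range' j (l.length - j) = j :: List.range' (j + 1) (l.length - (j + 1)) := by
      have he : l.length - j = (l.length - (j + 1)) + 1 := by omega
      rw [he, List.range'_succ]
    rw [hr] at h
    unfold pvFcbLoop at h
    have htgt : (if (true : Bool) then ')' else '(') = ')' := rfl
    rw [htgt] at h
    have hget : l.getD j ' ' = l[j] := List.getD_eq_getElem l ' ' hj
    have hdrop : l.drop j = l[j] :: l.drop (j + 1) := List.drop_eq_getElem_cons hj
    by_cases hstop : (b : Int) = 0 ∧ l.getD j ' ' = ')'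
    · rw [if_pos hstop] at h; simp at h
    · rw [if_neg hstop] at h
      by_cases hcp : l.getD j ' ' = ')'
      · have hbne : b ≠ 0 := fun hb => hstop ⟨by exact_mod_cast hb, hcp⟩
        have hcast : (if l.getD j ' ' = ')' then (b : Int) - 1
            else if l.getD j ' ' = '(' then (b : Int) + 1 else (b : Int))
            = ((b - 1 : Nat) : Int) := by
          rw [if_pos hcp]; omega
        rw [hcast] at h
        have hrec := ih (j + 1) (b - 1) (by omega) h
        have hc : l[j] = ')' := hget ▸ hcp
        have he : b + 1 - 1 = (b - 1) + 1 := by omega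
        rw [hdrop, List.foldl_cons, hc, pvStep_close, he]
        exact hrec
      · by_cases hco : l.getD j ' ' = '('
        · have hcast : (if l.getD j ' ' = ')' then (b : Int) - 1
              else if l.getD j ' ' = '(' then (b : Int) + 1 else (b : Int))
              = ((b + 1 : Nat) : Int) := by
            rw [if_neg hcp, if_pos hco]; omega
          rw [hcast] at h
          have hrec := ih (j + 1) (b + 1) (by omega) h
          have hc : l[j] = '(' := hget ▸ hco
          rw [hdrop, List.foldl_cons, hc, pvStep_open]
          exact hrec
        · have hcast : (if l.getD j ' ' = ')' then (b : Int) - 1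
              else if l.getD j ' ' = '(' then (b : Int) + 1 else (b : Int))
              = ((b : Nat) : Int) := by
            rw [if_neg hcp, if_neg hco]
          rw [hcast] at h
          have hrec := ih (j + 1) b (by omega) h
          have hc1 : l[j] ≠ ')' := hget ▸ hcp
          have hc2 : l[j] ≠ '(' := hget ▸ hco
          rw [hdrop, List.foldl_cons, pvStep_other _ hc2 hc1]
          exact hrec

-- main invariant: from any top-level position whose suffix is clamped-balanced,
-- A's jumping loop and B's depth-0 pass agree
theorem pvCut_agree (l : List Char) :
    ∀ n index last acc, l.length - index = n →
    (l.drop index).foldl pvStep 0 = 0 →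
    pvCutA l index last acc = pvCutB l index (l.drop index) 0 last acc := by
  intro n
  induction n using Nat.strong_induction_on with
  | _ n ih =>
    intro index last acc hn hbal
    by_cases h : index < l.length
    · have hget : l.getD index ' ' = l[index] := List.getD_eq_getElem l ' ' h
      have hdrop : l.drop index = l[index] :: l.drop (index + 1) := List.drop_eq_getElem_cons h
      by_cases hpm : l.getD index ' ' = '+' ∨ l.getD index ' ' = '-'
      · -- separator at top level: both append the token and advance
        have hpm' : l[index] = '+' ∨ l[index] = '-' := hget ▸ hpm
        have hb1 : l[index] ≠ '(' := by rcases hpm' with h1 | h1 <;> rw [h1] <;> decide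
        have hb2 : l[index] ≠ ')' := by rcases hpm' with h1 | h1 <;> rw [h1] <;> decide
        have hbal' : (l.drop (index + 1)).foldl pvStep 0 = 0 := by
          rw [hdrop, List.foldl_cons, pvStep_other _ hb1 hb2] at hbal
          exact hbal
        conv_lhs => unfold pvCutA
        rw [dif_pos h, if_pos hpm]
        rw [hdrop]
        conv_rhs => unfold pvCutB
        rw [if_neg hb1, if_neg hb2, if_pos (⟨rfl, hpm'⟩ : (0 : Nat) = 0 ∧ _)]
        have hlast : (if l.getD index ' ' = '+' then index + 1 else index)
                   = (if l[index] = '-' then index else index + 1) := by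
          rw [hget]
          rcases hpm' with h1 | h1 <;> rw [h1] <;> simp
        rw [hlast]
        exact ih (l.length - (index + 1)) (by omega) (index + 1) _ _ rfl hbal'
      · by_cases hob : l.getD index ' ' = '('
        · -- '(': A jumps to the matching ')', B walks through it at depth ≥ 1
          have hc : l[index] = '(' := hget ▸ hob
          have hbal1 : (l.drop (index + 1)).foldl pvStep (0 + 1) = 0 := by
            rw [hdrop, List.foldl_cons, hc, pvStep_open] at hbal
            exact hbal
          conv_lhs => unfold pvCutA
          rw [dif_pos h, if_neg hpm, dif_pos hob]
          rw [hdrop]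
          conv_rhs => unfold pvCutB
          rw [if_pos hc]
          cases hfb : pvFindBracket l index with
          | some p =>
            simp only []
            have hp' := hfb
            unfold pvFindBracket at hp'
            rw [if_pos hob] at hp'
            obtain ⟨h1, h2⟩ := pvFcb_skip l (l.length - (index + 1)) (index + 1) 0 p rfl
              (by exact_mod_cast hp')
            rw [h2 last acc]
            have hge : index + 1 ≤ p := pvFindBracket_ge hob hfb
            have hbal2 : (l.drop (p + 1)).foldl pvStep 0 = 0 := by
              rw [← h1]; exact hbal1
            exact ih (l.length - (p + 1)) (by omega) (p + 1) _ _ rfl hbal2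
          | none =>
            exfalso
            have hp' := hfb
            unfold pvFindBracket at hp'
            rw [if_pos hob] at hp'
            have := pvFcb_none l (l.length - (index + 1)) (index + 1) 0 rfl
              (by exact_mod_cast hp')
            omega
        · -- ordinary character (including a stray top-level ')'): both just advance
          have hc2 : l[index] ≠ '(' := hget ▸ hob
          conv_lhs => unfold pvCutA
          rw [dif_pos h, if_neg hpm, dif_neg hob]
          rw [hdrop]
          conv_rhs => unfold pvCutB
          by_cases hcp : l[index] = ')'
          · have hbal' : (l.drop (index + 1)).foldl pvStep 0 = 0 := by
              rw [hdrop, List.foldl_cons, hcp, pvStep_close] at hbal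
              exact hbal
            rw [if_neg hc2, if_pos hcp, if_neg (show ¬ (0 : Nat) > 0 by omega)]
            exact ih (l.length - (index + 1)) (by omega) (index + 1) last acc rfl hbal'
          · have hbal' : (l.drop (index + 1)).foldl pvStep 0 = 0 := by
              rw [hdrop, List.foldl_cons, pvStep_other _ hc2 hcp] at hbal
              exact hbal
            have hpm' : ¬ ((0 : Nat) = 0 ∧ (l[index] = '+' ∨ l[index] = '-')) :=
              fun hx => hpm (hget ▸ hx.2)
            rw [if_neg hc2, if_neg hcp, if_neg hpm']
            exact ih (l.length - (index + 1)) (by omega) (index + 1) last acc rfl hbal'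
    · -- end of string: both emit the final token
      conv_lhs => unfold pvCutA
      rw [dif_neg h]
      rw [List.drop_eq_nil_of_le (by omega)]
      conv_rhs => unfold pvCutB
      have hsl : pvSlice l last index = l.drop last := by
        unfold pvSlice
        apply List.take_of_length_le
        have := List.length_drop (l := l) (i := last)
        omega
      rw [hsl]

-- ===== VERDICT (by name: the statement is the Claim_ definition above) =====
theorem cut_sum_lexemes_spec : Claim_equal_cut_sum_lexemes := by
  intro s _ hpre
  unfold Spec_cut_sum_lexemes cut_sum_lexemes cut_sum_lexemes_alt
  have := pvCut_agree s.toList (s.toList.length - 0) 0 0 [] rfl (by simpa using hpre)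
  simpa using this
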